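-- pv_equiv track=rewrite | github.com/Greenmamba29/thanos-complete-system | agents/tools/list-files.py | _generate_size_stats
-- ===== SOURCE A (Python) =====
-- from typing import Dict, Any, List, Optional, Generator
--
-- def _generate_size_stats(files: List[Dict[str, Any]]) -> Dict[str, int]:
--     """Generate file size distribution statistics"""
--
--     size_buckets = {
--         "tiny": 0,      # < 10KB
--         "small": 0,     # 10KB - 100KB
--         "medium": 0,    # 100KB - 1MB
--         "large": 0,     # 1MB - 10MB
--         "huge": 0       # > 10MB
--     }
--
--     for file_info in files:
--         size = file_info.get("size", 0)
--
--         if size < 10240:  # 10KB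
--             size_buckets["tiny"] += 1
--         elif size < 102400:  # 100KB
--             size_buckets["small"] += 1
--         elif size < 1048576:  # 1MB
--             size_buckets["medium"] += 1
--         elif size < 10485760:  # 10MB
--             size_buckets["large"] += 1
--         else:
--             size_buckets["huge"] += 1
--
--     return size_buckets
-- ===== SOURCE B (Python) =====
-- def _generate_size_stats(files):
--     """Generate file size distribution statistics via cumulative counts (CDF) and differencing."""
--     sizes = [f.get("size", 0) for f in files]
--     cum = [sum(1 for s in sizes if s < b) for b in (10240, 102400, 1048576, 10485760)]
--     edges = [0] + cum + [len(sizes)]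
--     labels = ["tiny", "small", "medium", "large", "huge"]
--     return {lab: edges[i + 1] - edges[i] for i, lab in enumerate(labels)}
-- ===== Notes on version B (the rewrite author's own statement) =====
-- stated objective: alternative
-- what changed: Instead of assigning each file to a bucket with an if/elif cascade in one pass, B computes the cumulative distribution (for each threshold, one counting pass over all sizes gives how many files fall below it) and derives each bucket count by differencing adjacent cumulative counts; no per-file bucket decision is ever made.
import Mathlib
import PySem

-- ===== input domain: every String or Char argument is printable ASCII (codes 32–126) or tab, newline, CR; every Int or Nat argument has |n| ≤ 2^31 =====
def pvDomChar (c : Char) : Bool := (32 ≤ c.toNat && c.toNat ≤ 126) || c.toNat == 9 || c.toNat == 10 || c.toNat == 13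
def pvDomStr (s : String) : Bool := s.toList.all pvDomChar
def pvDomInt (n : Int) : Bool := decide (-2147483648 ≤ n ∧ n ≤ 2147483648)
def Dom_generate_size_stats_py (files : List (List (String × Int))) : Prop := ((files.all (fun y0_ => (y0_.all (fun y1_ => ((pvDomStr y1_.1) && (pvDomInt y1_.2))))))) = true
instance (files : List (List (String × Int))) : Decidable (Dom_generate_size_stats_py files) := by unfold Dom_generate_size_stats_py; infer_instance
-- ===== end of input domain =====

-- B computes the cumulative distribution (one counting pass per threshold) and derives
-- each bucket by differencing adjacent cumulative counts, instead of A's per-file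
-- if/elif bucket assignment (objective: alternative).

-- ===== PORT A =====
def generate_size_stats_py (files : List (List (String × Int))) : List (String × Int) :=
  let size_buckets : PySem.Dict String Int :=
    PySem.Dict.ofList [("tiny", 0), ("small", 0), ("medium", 0), ("large", 0), ("huge", 0)]
  let size_buckets := files.foldl (fun size_buckets file_info =>
    let size := (PySem.Dict.ofList file_info).getD "size" 0
    if size < 10240 then size_buckets.modify "tiny" 0 (· + 1)
    else if size < 102400 then size_buckets.modify "small" 0 (· + 1)
    else if size < 1048576 then size_buckets.modify "medium" 0 (· + 1)
    else if size < 10485760 then size_buckets.modify "large" 0 (· + 1)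
    else size_buckets.modify "huge" 0 (· + 1)) size_buckets
  size_buckets.items

-- ===== PORT B =====
def generate_size_stats_py_alt (files : List (List (String × Int))) : List (String × Int) :=
  let sizes := files.map (fun f => (PySem.Dict.ofList f).getD "size" 0)
  let cum := ([10240, 102400, 1048576, 10485760] : List Int).map
      (fun b => sizes.foldl (fun acc s => if s < b then acc + 1 else acc) (0 : Int))
  let edges := [(0 : Int)] ++ cum ++ [(sizes.length : Int)]
  let labels := ["tiny", "small", "medium", "large", "huge"]
  (PySem.List.enumerate labels).map (fun il =>
    (il.2, PySem.List.pyGetD edges (il.1 + 1) 0 - PySem.List.pyGetD edges il.1 0))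

-- ===== PRECONDITION & SPEC =====
def Spec_generate_size_stats_py (files : List (List (String × Int))) (out : List (String × Int)) : Prop := out = generate_size_stats_py_alt files
instance (files : List (List (String × Int))) (out : List (String × Int)) : Decidable (Spec_generate_size_stats_py files out) := by unfold Spec_generate_size_stats_py; infer_instance

-- ===== CLAIM (what is proved, stated in full; the proofs are below) =====
def Claim_equal_generate_size_stats_py : Prop := ∀ (files : List (List (String × Int))), Dom_generate_size_stats_py files → Spec_generate_size_stats_py files (generate_size_stats_py files)

-- ===== LEMMAS AND PROOFS =====

-- A's loop body with the looked-up size split out, so it can be generalized.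
def pvBodyA (size : Int) (size_buckets : PySem.Dict String Int) : PySem.Dict String Int :=
  if size < 10240 then size_buckets.modify "tiny" 0 (· + 1)
  else if size < 102400 then size_buckets.modify "small" 0 (· + 1)
  else if size < 1048576 then size_buckets.modify "medium" 0 (· + 1)
  else if size < 10485760 then size_buckets.modify "large" 0 (· + 1)
  else size_buckets.modify "huge" 0 (· + 1)

def pvStepA (size_buckets : PySem.Dict String Int) (file_info : List (String × Int)) : PySem.Dict String Int :=
  pvBodyA ((PySem.Dict.ofList file_info).getD "size" 0) size_buckets

def pvSz (f : List (String × Int)) : Int := (PySem.Dict.ofList f).getD "size" 0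

-- Int-valued cumulative counts over the file list.
def pvC (b : Int) (files : List (List (String × Int))) : Int :=
  (files.countP (fun f => decide (pvSz f < b)) : Int)

theorem pv_body_tiny (s a b c d e : Int) (h1 : s < 10240) :
    pvBodyA s (PySem.Dict.mk [("tiny", a), ("small", b), ("medium", c), ("large", d), ("huge", e)]) = PySem.Dict.mk [("tiny", a + 1), ("small", b), ("medium", c), ("large", d), ("huge", e)] := by
  simp [pvBodyA, h1, PySem.Dict.modify, PySem.Dict.insert, PySem.Dict.getD, PySem.Dict.get?, PySem.Dict.contains]

theorem pv_body_small (s a b c d e : Int) (h1 : ¬ s < 10240) (h2 : s < 102400) :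
    pvBodyA s (PySem.Dict.mk [("tiny", a), ("small", b), ("medium", c), ("large", d), ("huge", e)]) = PySem.Dict.mk [("tiny", a), ("small", b + 1), ("medium", c), ("large", d), ("huge", e)] := by
  simp [pvBodyA, h1, h2, PySem.Dict.modify, PySem.Dict.insert, PySem.Dict.getD, PySem.Dict.get?, PySem.Dict.contains]

theorem pv_body_medium (s a b c d e : Int) (h1 : ¬ s < 10240) (h2 : ¬ s < 102400) (h3 : s < 1048576) :
    pvBodyA s (PySem.Dict.mk [("tiny", a), ("small", b), ("medium", c), ("large", d), ("huge", e)]) = PySem.Dict.mk [("tiny", a), ("small", b), ("medium", c + 1), ("large", d), ("huge", e)] := by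
  simp [pvBodyA, h1, h2, h3, PySem.Dict.modify, PySem.Dict.insert, PySem.Dict.getD, PySem.Dict.get?, PySem.Dict.contains]

theorem pv_body_large (s a b c d e : Int) (h1 : ¬ s < 10240) (h2 : ¬ s < 102400) (h3 : ¬ s < 1048576) (h4 : s < 10485760) :
    pvBodyA s (PySem.Dict.mk [("tiny", a), ("small", b), ("medium", c), ("large", d), ("huge", e)]) = PySem.Dict.mk [("tiny", a), ("small", b), ("medium", c), ("large", d + 1), ("huge", e)] := by
  simp [pvBodyA, h1, h2, h3, h4, PySem.Dict.modify, PySem.Dict.insert, PySem.Dict.getD, PySem.Dict.get?, PySem.Dict.contains]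

theorem pv_body_huge (s a b c d e : Int) (h1 : ¬ s < 10240) (h2 : ¬ s < 102400) (h3 : ¬ s < 1048576) (h4 : ¬ s < 10485760) :
    pvBodyA s (PySem.Dict.mk [("tiny", a), ("small", b), ("medium", c), ("large", d), ("huge", e)]) = PySem.Dict.mk [("tiny", a), ("small", b), ("medium", c), ("large", d), ("huge", e + 1)] := by
  simp [pvBodyA, h1, h2, h3, h4, PySem.Dict.modify, PySem.Dict.insert, PySem.Dict.getD, PySem.Dict.get?, PySem.Dict.contains]

-- Invariant: A's fold from any 5-value state equals labels zipped with the
-- accumulators shifted by differences of cumulative counts.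
theorem pv_fold (files : List (List (String × Int))) : ∀ (a b c d e : Int),
    (files.foldl pvStepA
      (PySem.Dict.mk [("tiny", a), ("small", b), ("medium", c), ("large", d), ("huge", e)])).items
    = (["tiny", "small", "medium", "large", "huge"]).zip
        [a + pvC 10240 files,
         b + (pvC 102400 files - pvC 10240 files),
         c + (pvC 1048576 files - pvC 102400 files),
         d + (pvC 10485760 files - pvC 1048576 files),
         e + ((files.length : Int) - pvC 10485760 files)] := by
  induction files with
  | nil => intro a b c d e; simp [pvC]
  | cons f fs ih =>
    intro a b c d e
    simp only [List.foldl_cons, pvStepA, pvC, List.countP_cons, List.length_cons]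
    rw [show (PySem.Dict.ofList f).getD "size" 0 = pvSz f from rfl]
    generalize hs : pvSz f = s
    by_cases h1 : s < 10240
    · rw [pv_body_tiny s a b c d e h1, ih (a + 1) b c d e]
      simp only [pvC]
      congr 1
      simp only [h1, List.cons.injEq, and_true, decide_true,
        show s < 102400 by omega, show s < 1048576 by omega, show s < 10485760 by omega]
      push_cast; refine ⟨by ring, by ring, by ring, by ring, by ring⟩
    · by_cases h2 : s < 102400
      · rw [pv_body_small s a b c d e h1 h2, ih a (b + 1) c d e]
        simp only [pvC]
        congr 1
        simp only [h1, h2, List.cons.injEq, and_true, decide_true, decide_false,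
          show s < 1048576 by omega, show s < 10485760 by omega]
        push_cast; refine ⟨by ring, by ring, by ring, by ring, by ring⟩
      · by_cases h3 : s < 1048576
        · rw [pv_body_medium s a b c d e h1 h2 h3, ih a b (c + 1) d e]
          simp only [pvC]
          congr 1
          simp only [h1, h2, h3, List.cons.injEq, and_true, decide_true, decide_false,
            show s < 10485760 by omega]
          push_cast; refine ⟨by ring, by ring, by ring, by ring, by ring⟩
        · by_cases h4 : s < 10485760
          · rw [pv_body_large s a b c d e h1 h2 h3 h4, ih a b c (d + 1) e]
            simp only [pvC]
            congr 1
            simp only [h1, h2, h3, h4, List.cons.injEq, and_true, decide_true, decide_false]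
            push_cast; refine ⟨by ring, by ring, by ring, by ring, by ring⟩
          · rw [pv_body_huge s a b c d e h1 h2 h3 h4, ih a b c d (e + 1)]
            simp only [pvC]
            congr 1
            simp only [h1, h2, h3, h4, List.cons.injEq, and_true, decide_false]
            push_cast; refine ⟨by ring, by ring, by ring, by ring, by ring⟩

-- B's value, reduced to the same zipped difference form.
theorem pv_alt_eq (files : List (List (String × Int))) :
    generate_size_stats_py_alt files
    = (["tiny", "small", "medium", "large", "huge"]).zip
        [pvC 10240 files,
         pvC 102400 files - pvC 10240 files,
         pvC 1048576 files - pvC 102400 files,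
         pvC 10485760 files - pvC 1048576 files,
         (files.length : Int) - pvC 10485760 files] := by
  unfold generate_size_stats_py_alt
  simp only [List.map_cons, List.map_nil,
    PySem.List.foldl_ite_add_one, List.countP_map,
    PySem.List.enumerate, PySem.List.pyGetD, PySem.List.pyGet?, PySem.List.pyIdx?]
  simp only [Function.comp_def]
  simp [pvC, pvSz, List.zip]
  exact ⟨rfl, rfl, rfl, rfl, rfl⟩

-- ===== VERDICT (by name: the statement is the Claim_ definition above) =====
theorem generate_size_stats_py_spec : Claim_equal_generate_size_stats_py := by
  intro files _
  unfold Spec_generate_size_stats_py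
  have hA : generate_size_stats_py files
      = (List.foldl pvStepA (PySem.Dict.mk [("tiny", 0), ("small", 0), ("medium", 0), ("large", 0), ("huge", 0)]) files).items := rfl
  rw [hA, pv_fold files 0 0 0 0 0, pv_alt_eq files]
  norm_num
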